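-- pv_equiv track=rewrite | github.com/chaosWsF/Python-Practice | leetcode/0003_longest_substring_without_repeating_characters.py | uniqueOrder
-- ===== SOURCE A (Python) =====
-- def uniqueOrder(s):
--     seen = {}
--     ss_list = []
--     for ss in s:
--         if ss in seen:
--             continue
--         seen[ss] = 1
--         ss_list.append(ss)
--
--     return ''.join(ss_list)
-- ===== SOURCE B (Python) =====
-- def uniqueOrder(s):
--     if not s:
--         return ''
--     return s[0] + uniqueOrder(s[1:].replace(s[0], ''))
-- ===== Notes on version B (the rewrite author's own statement) =====
-- stated objective: alternative
-- what changed: B replaces A's single pass with a seen-dict by head recursion with elimination passes: keep the first character and recurse on the rest with every copy of it deleted via str.replace.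
import Mathlib
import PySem

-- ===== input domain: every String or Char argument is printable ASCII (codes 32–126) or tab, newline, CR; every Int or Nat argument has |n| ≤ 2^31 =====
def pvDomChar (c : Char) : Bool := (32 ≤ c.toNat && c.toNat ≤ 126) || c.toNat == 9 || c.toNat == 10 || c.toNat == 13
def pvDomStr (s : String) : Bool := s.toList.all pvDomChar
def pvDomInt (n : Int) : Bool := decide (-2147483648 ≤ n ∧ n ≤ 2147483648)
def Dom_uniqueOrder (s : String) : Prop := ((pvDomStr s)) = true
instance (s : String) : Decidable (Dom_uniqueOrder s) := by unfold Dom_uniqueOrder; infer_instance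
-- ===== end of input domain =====

-- B replaces A's single pass with a seen-dict by head recursion with elimination passes:
-- keep the first character and recurse on the tail with all its copies deleted (str.replace);
-- alternative decomposition, not faster.

-- ===== PORT A =====
-- seen = {}; ss_list = []; for ss in s: if ss in seen: continue; seen[ss] = 1; ss_list.append(ss); return ''.join(ss_list)
def uniqueOrder (s : String) : String :=
  String.ofList (s.toList.foldl
    (fun (acc : PySem.Dict Char Int × List Char) ss =>
      if acc.1.contains ss then acc
      else (acc.1.insert ss 1, acc.2 ++ [ss]))
    (PySem.Dict.empty, [])).2

-- ===== PORT B =====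
-- s.replace(c, '') with a single-character pattern and empty replacement deletes every
-- occurrence of c; this lemma (replace = filter) is proved below the claim block as
-- pvReplace_single_empty and is cited here only for termination of the recursion.
theorem pvReplaceGo_single_empty (c : Char) (l : List Char) :
    ∀ (fuel : Nat) (acc : List Char), l.length ≤ fuel →
      PySem.Chars.replace.go [c] [] fuel l acc
        = acc.reverse ++ l.filter (fun d => d ≠ c) := by
  induction l with
  | nil =>
    intro fuel acc _
    cases fuel <;> simp [PySem.Chars.replace.go]
  | cons d t ih =>
    intro fuel acc hlen
    cases fuel with
    | zero => simp at hlen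
    | succ m =>
      simp only [List.length_cons, Nat.succ_le_succ_iff] at hlen
      by_cases hdc : d = c
      · subst hdc
        have hpre : List.isPrefixOf [d] (d :: t) = true := by simp [List.isPrefixOf]
        simp only [PySem.Chars.replace.go, hpre, if_true, List.length_cons,
          List.length_nil, List.reverse_nil, List.nil_append,
          show (0 + 1) = 1 from rfl, List.drop_succ_cons, List.drop_zero]
        rw [ih m acc hlen]
        simp
      · have hpre : List.isPrefixOf [c] (d :: t) = false := by
          simp [List.isPrefixOf]; exact fun h => absurd h.symm hdc
        simp only [PySem.Chars.replace.go, hpre, if_false, Bool.false_eq_true]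
        rw [ih m (d :: acc) hlen]
        simp [hdc]

theorem pvReplace_single_empty (c : Char) (t : List Char) :
    PySem.Chars.replace t [c] [] = t.filter (fun d => d ≠ c) := by
  rw [PySem.Chars.replace]
  simp only [List.isEmpty_cons, Bool.false_eq_true, if_false]
  rw [pvReplaceGo_single_empty c t t.length [] (le_refl _)]
  simp

-- if not s: return ''; return s[0] + uniqueOrder(s[1:].replace(s[0], ''))
def pvUoRec : List Char → List Char
  | [] => []
  | c :: t => c :: pvUoRec (PySem.Chars.replace t [c] [])
termination_by l => l.length
decreasing_by
  rw [pvReplace_single_empty]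
  exact Nat.lt_succ_of_le (List.length_filter_le _ _)

def uniqueOrder_alt (s : String) : String := String.ofList (pvUoRec s.toList)

-- ===== PRECONDITION & SPEC =====
def Spec_uniqueOrder (s : String) (out : String) : Prop := out = uniqueOrder_alt s
instance (s : String) (out : String) : Decidable (Spec_uniqueOrder s out) := by unfold Spec_uniqueOrder; infer_instance

-- ===== CLAIM (what is proved, stated in full; the proofs are below) =====
def Claim_equal_uniqueOrder : Prop := ∀ (s : String), Dom_uniqueOrder s → Spec_uniqueOrder s (uniqueOrder s)

-- ===== LEMMAS AND PROOFS =====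

-- first occurrences of l not already in seen, in order (characterises A's loop)
def pvFNew : List Char → List Char → List Char
  | [], _ => []
  | c :: t, seen => if c ∈ seen then pvFNew t seen else c :: pvFNew t (seen ++ [c])

theorem pvFNew_congr (l : List Char) (s1 s2 : List Char)
    (h : ∀ x, x ∈ s1 ↔ x ∈ s2) : pvFNew l s1 = pvFNew l s2 := by
  induction l generalizing s1 s2 with
  | nil => rfl
  | cons c t ih =>
    simp only [pvFNew]
    by_cases hc : c ∈ s1
    · rw [if_pos hc, if_pos ((h c).mp hc)]
      exact ih s1 s2 h
    · rw [if_neg hc, if_neg (fun hx => hc ((h c).mpr hx))]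
      refine congrArg (c :: ·) (ih _ _ ?_)
      intro x; simp [h x]

theorem pvFoldA (l : List Char) (d : PySem.Dict Char Int) (acc seen : List Char)
    (h : ∀ c, d.contains c = true ↔ c ∈ seen) :
    (l.foldl (fun (acc : PySem.Dict Char Int × List Char) ss =>
      if acc.1.contains ss then acc
      else (acc.1.insert ss 1, acc.2 ++ [ss])) (d, acc)).2
      = acc ++ pvFNew l seen := by
  induction l generalizing d acc seen with
  | nil => simp [pvFNew]
  | cons c t ih =>
    simp only [List.foldl_cons, pvFNew]
    by_cases hc : d.contains c = true
    · rw [if_pos hc, if_pos ((h c).mp hc)]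
      exact ih d acc seen h
    · rw [if_neg hc, if_neg (fun hx => hc ((h c).mpr hx))]
      rw [ih (d.insert c 1) (acc ++ [c]) (seen ++ [c]) ?_]
      · simp
      · intro x
        rw [PySem.Dict.contains_insert]
        simp only [List.mem_append, List.mem_singleton]
        constructor
        · intro hx
          rcases Bool.or_eq_true_iff.mp hx with h1 | h1
          · exact Or.inr (by simpa using h1)
          · exact Or.inl ((h x).mp h1)
        · rintro (hx | rfl)
          · exact Bool.or_eq_true_iff.mpr (Or.inr ((h x).mpr hx))
          · simp

-- filtering c out of the list is the same as putting c into the seen set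
theorem pvFNew_filter (c : Char) (l : List Char) :
    ∀ (seen : List Char), c ∉ seen →
      pvFNew l (seen ++ [c]) = pvFNew (l.filter (fun d => d ≠ c)) seen := by
  induction l with
  | nil => intro seen _; rfl
  | cons d t ih =>
    intro seen hc
    by_cases hdc : d = c
    · subst hdc
      rw [show pvFNew (d :: t) (seen ++ [d]) = pvFNew t (seen ++ [d]) by
        simp [pvFNew]]
      rw [show List.filter (fun x => decide (x ≠ d)) (d :: t)
          = List.filter (fun x => decide (x ≠ d)) t by simp]
      exact ih seen hc
    · simp only [List.filter_cons]
      rw [if_pos (by simp [hdc])]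
      by_cases hds : d ∈ seen
      · rw [show pvFNew (d :: t) (seen ++ [c]) = pvFNew t (seen ++ [c]) by
          simp [pvFNew, hds]]
        rw [show pvFNew (d :: t.filter (fun d => d ≠ c)) seen
            = pvFNew (t.filter (fun d => d ≠ c)) seen by simp [pvFNew, hds]]
        exact ih seen hc
      · have hd1 : d ∉ seen ++ [c] := by
          simp only [List.mem_append, List.mem_singleton]
          push Not
          exact ⟨hds, hdc⟩
        rw [show pvFNew (d :: t) (seen ++ [c])
            = d :: pvFNew t (seen ++ [c] ++ [d]) by simp [pvFNew, hd1]]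
        rw [show pvFNew (d :: t.filter (fun d => d ≠ c)) seen
            = d :: pvFNew (t.filter (fun d => d ≠ c)) (seen ++ [d]) by
          simp [pvFNew, hds]]
        have hperm : ∀ x, x ∈ seen ++ [c] ++ [d] ↔ x ∈ seen ++ [d] ++ [c] := by
          intro x; simp; tauto
        rw [pvFNew_congr t _ _ hperm]
        refine congrArg (d :: ·) (ih (seen ++ [d]) ?_)
        simp only [List.mem_append, List.mem_singleton]
        push Not
        exact ⟨hc, fun h => hdc h.symm⟩

theorem pvUoRec_eq_pvFNew (l : List Char) : pvUoRec l = pvFNew l [] := by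
  induction l using pvUoRec.induct with
  | case1 => simp [pvUoRec, pvFNew]
  | case2 c t ih =>
    rw [pvUoRec, pvReplace_single_empty]
    rw [pvReplace_single_empty] at ih
    rw [ih, show pvFNew (c :: t) [] = c :: pvFNew t [c] by simp [pvFNew],
      show ([c] : List Char) = [] ++ [c] from rfl, pvFNew_filter c t [] (by simp)]

-- ===== VERDICT (by name: the statement is the Claim_ definition above) =====
theorem uniqueOrder_spec : Claim_equal_uniqueOrder := by
  intro s _
  unfold Spec_uniqueOrder uniqueOrder uniqueOrder_alt
  have hA := pvFoldA s.toList PySem.Dict.empty [] []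
    (by intro c; simp [PySem.Dict.contains_empty])
  simp only [List.nil_append] at hA
  rw [hA, pvUoRec_eq_pvFNew]
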